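-- pv_equiv track=rewrite | github.com/valthalion/aoc2021 | puzzle17.py | vertical_trajectories
-- ===== SOURCE A (Python) =====
-- def vertical_intersections(v, target):
--     pos, step = 0, 0
--     intersections = set()
--     while pos >= target['y1'] or v > 0:
--         pos += v
--         step += 1
--         if target['y1'] <= pos <= target['y2']:
--             intersections.add(step)
--         v -= 1
--     return intersections
--
-- def vertical_trajectories(target):
--     min_vy = target['y1']
--     max_vy = 125  # TODO: Calculate this
--     trajectories = {}
--     for vy in range(min_vy, max_vy):
--         in_target = vertical_intersections(vy, target)
--         if in_target:
--             trajectories[vy] = in_target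
--     return trajectories
-- ===== SOURCE B (Python) =====
-- def _pos(vy, t):
--     # position after t steps with initial vertical velocity vy (closed form)
--     return t * vy - t * (t - 1) // 2
--
--
-- def vertical_trajectories(target):
--     y1, y2 = target['y1'], target['y2']
--     trajectories = {}
--     for vy in range(y1, 125):
--         # beyond this step index the probe stays strictly below y1 forever
--         bound = 2 * max(vy, 0) + max(1, 1 - 2 * y1) + 2
--         steps = {t for t in range(1, bound) if y1 <= _pos(vy, t) <= y2}
--         if steps:
--             trajectories[vy] = steps
--     return trajectories
-- ===== Notes on version B (the rewrite author's own statement) =====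
-- stated objective: alternative
-- what changed: Replaces A's per-velocity step-by-step while-loop simulation of position/velocity with a closed-form position formula p(t)=t*vy-t*(t-1)//2 filtered over an analytically bounded step range; Pre_ excludes targets missing the 'y1' or 'y2' key: there A raises KeyError (except that with 'y2' missing and y1>=125 A returns {}), while B, which looks both keys up front, raises KeyError.
-- outside the precondition, e.g. on vertical_trajectories({'y1': 200}): A returns {}, B raises KeyError
import Mathlib
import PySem

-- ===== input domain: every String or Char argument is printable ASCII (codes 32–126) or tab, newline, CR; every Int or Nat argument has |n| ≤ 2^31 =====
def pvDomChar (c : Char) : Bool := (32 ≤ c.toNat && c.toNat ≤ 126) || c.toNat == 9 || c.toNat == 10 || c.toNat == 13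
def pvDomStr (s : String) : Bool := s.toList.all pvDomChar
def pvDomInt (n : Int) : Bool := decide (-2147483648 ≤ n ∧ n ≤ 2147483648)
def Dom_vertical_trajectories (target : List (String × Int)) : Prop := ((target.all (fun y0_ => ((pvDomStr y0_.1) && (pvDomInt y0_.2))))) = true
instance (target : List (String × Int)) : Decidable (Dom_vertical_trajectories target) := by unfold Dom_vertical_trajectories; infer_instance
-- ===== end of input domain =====

-- B replaces A's per-velocity step simulation by a closed-form position formula filtered
-- over an analytically bounded step range (objective: alternative; same return value).

-- ===== PORT A =====
-- termination measure decrease for viLoop's while-loop (cited by name in decreasing_by)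
theorem viLoop_dec_pos (v : Int) (hv : 0 < v) : (v - 1 + 1).toNat < (v + 1).toNat := by
  rw [sub_add_cancel]
  exact (Int.toNat_lt_toNat (by linarith)).mpr (lt_add_one v)

theorem viLoop_dec_nonpos (y1 pos v : Int) (hp : y1 ≤ pos) (hv : ¬ 0 < v) :
    2 * (2 * (pos + v - y1) + 0 + 1).toNat + (v - 1 + 1).toNat <
    2 * (2 * (pos - y1) + 0 + 1).toNat + (v + 1).toNat := by
  rw [sub_add_cancel, Int.toNat_of_nonpos (not_lt.mp hv), Nat.add_zero]
  rcases (not_lt.mp hv).lt_or_eq with hlt | heq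
  · have hb : (0:ℤ) < 2 * (pos - y1) + 0 + 1 := by linarith
    have hstep : (2 * (pos + v - y1) + 0 + 1).toNat < (2 * (pos - y1) + 0 + 1).toNat :=
      (Int.toNat_lt_toNat hb).mpr (by linarith)
    calc 2 * (2 * (pos + v - y1) + 0 + 1).toNat
        < 2 * (2 * (pos - y1) + 0 + 1).toNat := mul_lt_mul_of_pos_left hstep two_pos
      _ ≤ 2 * (2 * (pos - y1) + 0 + 1).toNat + (v + 1).toNat := Nat.le_add_right _ _
  · rw [heq, add_zero pos, zero_add, Int.toNat_one]
    exact Nat.lt_add_of_pos_right Nat.one_pos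

theorem viLoop_ite_peak (v : Int) (hv : 0 < v) :
    (if 0 < v - 1 then (v - 1) * (v - 1 + 1) else 0) = v * (v + 1) - 2 * v := by
  by_cases hc : 0 < v - 1
  · rw [if_pos hc]
    ring
  · rw [if_neg hc]
    have h2 : v = 1 := le_antisymm (by linarith [not_lt.mp hc]) (by linarith)
    rw [h2]
    decide

theorem viLoop_measure_lt (y1 pos v : Int) (h : y1 ≤ pos ∨ 0 < v) :
    2 * (2 * (pos + v - y1) + (if 0 < v - 1 then (v - 1) * (v - 1 + 1) else 0) + 1).toNat +
      (v - 1 + 1).toNat <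
    2 * (2 * (pos - y1) + (if 0 < v then v * (v + 1) else 0) + 1).toNat + (v + 1).toNat := by
  by_cases hv : 0 < v
  · rw [if_pos hv, viLoop_ite_peak v hv,
      show 2 * (pos + v - y1) + (v * (v + 1) - 2 * v) + 1
          = 2 * (pos - y1) + v * (v + 1) + 1 from by ring]
    exact Nat.add_lt_add_left (viLoop_dec_pos v hv) _
  · rw [if_neg (fun hc => hv (lt_trans hc (sub_lt_self v one_pos))), if_neg hv]
    exact viLoop_dec_nonpos y1 pos v (h.resolve_right hv) hv

-- the while-loop of vertical_intersections; target's two entries are passed as y1 y2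
def viLoop (y1 y2 pos v step : Int) (acc : PySem.Set Int) : PySem.Set Int :=
  if y1 ≤ pos ∨ 0 < v then
    viLoop y1 y2 (pos + v) (v - 1) (step + 1)
      (if y1 ≤ pos + v ∧ pos + v ≤ y2 then PySem.Set.add acc (step + 1) else acc)
  else acc
termination_by (2 * (2 * (pos - y1) + (if 0 < v then v * (v + 1) else 0) + 1).toNat + (v + 1).toNat)
decreasing_by
  rename_i h
  exact viLoop_measure_lt y1 pos v h

def vertical_intersections (v : Int) (y1 y2 : Int) : PySem.Set Int :=
  viLoop y1 y2 0 v 0 PySem.Set.empty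

def vertical_trajectories (target : List (String × Int)) : List (Int × List Int) :=
  let t := PySem.Dict.mk target
  let min_vy := (t.get? "y1").getD 0          -- Pre_ guarantees the key is present
  let y2 := (t.get? "y2").getD 0
  ((PySem.List.pyRange min_vy 125 1).foldl
    (fun d vy =>
      let in_target := vertical_intersections vy min_vy y2
      if in_target.isEmpty then d else d.insert vy in_target)
    PySem.Dict.empty).items

-- ===== PORT B =====
-- Source B's helper _pos: position after t steps with initial vertical velocity vy
def pvPos (vy t : Int) : Int := t * vy - PySem.Int.floordiv (t * (t - 1)) 2

def vertical_trajectories_alt (target : List (String × Int)) : List (Int × List Int) :=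
  let t := PySem.Dict.mk target
  let y1 := (t.get? "y1").getD 0              -- Pre_ guarantees the key is present
  let y2 := (t.get? "y2").getD 0
  ((PySem.List.pyRange y1 125 1).foldl
    (fun d vy =>
      let bound := 2 * max vy 0 + max 1 (1 - 2 * y1) + 2
      let steps := PySem.Set.ofList ((PySem.List.pyRange 1 bound 1).filter
        (fun s => decide (y1 ≤ pvPos vy s) && decide (pvPos vy s ≤ y2)))
      if steps.isEmpty then d else d.insert vy steps)
    PySem.Dict.empty).items

-- ===== PRECONDITION & SPEC =====
-- Pre_ requires both keys 'y1' and 'y2': missing 'y1' makes A raise KeyError at once, and a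
-- missing 'y2' makes A raise KeyError unless y1 >= 125 (where A returns {}), while B, which
-- looks both keys up front, raises there.
def Pre_vertical_trajectories (target : List (String × Int)) : Prop :=
  ((PySem.Dict.mk target).get? "y1").isSome = true ∧ ((PySem.Dict.mk target).get? "y2").isSome = true
instance (target : List (String × Int)) : Decidable (Pre_vertical_trajectories target) := by
  unfold Pre_vertical_trajectories; infer_instance
def pvWitness_vertical_trajectories : (List (String × Int)) := [("y1", -3), ("y2", -1)]

def Spec_vertical_trajectories (target : List (String × Int)) (out : List (Int × List Int)) : Prop := out = vertical_trajectories_alt target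
instance (target : List (String × Int)) (out : List (Int × List Int)) : Decidable (Spec_vertical_trajectories target out) := by unfold Spec_vertical_trajectories; infer_instance

-- ===== CLAIM (what is proved, stated in full; the proofs are below) =====
def Claim_equal_vertical_trajectories : Prop := ∀ (target : List (String × Int)), Dom_vertical_trajectories target → Pre_vertical_trajectories target → Spec_vertical_trajectories target (vertical_trajectories target)

-- ===== LEMMAS AND PROOFS =====

lemma two_mul_pvPos (vy t : Int) : 2 * pvPos vy t = t * (2 * vy - t + 1) := by
  obtain ⟨k, hk⟩ : Even (t * (t - 1)) := by
    have := Int.even_mul_succ_self (t - 1)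
    simpa [mul_comm] using this
  have hdiv : PySem.Int.floordiv (t * (t - 1)) 2 = k := by
    rw [PySem.Int.floordiv_eq_ediv_of_pos (by norm_num), hk]
    omega
  unfold pvPos
  rw [hdiv]
  linear_combination hk

lemma pvPos_zero (vy : Int) : pvPos vy 0 = 0 := by
  have := two_mul_pvPos vy 0
  omega

lemma pvPos_succ (vy t : Int) : pvPos vy (t + 1) = pvPos vy t + (vy - t) := by
  have h1 := two_mul_pvPos vy (t + 1)
  have h2 := two_mul_pvPos vy t
  have h3 : 2 * pvPos vy (t + 1) = 2 * (pvPos vy t + (vy - t)) := by linear_combination h1 - h2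
  omega

lemma pvPos_mono (vy s t : Int) (hv : vy ≤ s) (hst : s ≤ t) : pvPos vy t ≤ pvPos vy s := by
  induction t, hst using Int.le_induction with
  | base => exact le_refl _
  | succ n hn ih =>
      have := pvPos_succ vy n
      omega

lemma pvPos_bound (y1 vy t : Int) (ht : 2 * max vy 0 + max 1 (1 - 2 * y1) + 1 ≤ t) :
    pvPos vy t < y1 := by
  have h := two_mul_pvPos vy t
  have h2 : 2 * vy - t + 1 ≤ -(max 1 (1 - 2 * y1)) := by omega
  have h3 : t * (2 * vy - t + 1) ≤ t * (-(max 1 (1 - 2 * y1))) :=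
    mul_le_mul_of_nonneg_left h2 (by omega)
  have h4 : t * (-(max 1 (1 - 2 * y1))) ≤ 1 * (-(max 1 (1 - 2 * y1))) :=
    mul_le_mul_of_nonpos_right (by omega) (by omega)
  have h5 : 2 * pvPos vy t ≤ -(max 1 (1 - 2 * y1)) := by
    rw [h]; calc t * (2 * vy - t + 1) ≤ _ := h3
      _ ≤ _ := h4
      _ = -(max 1 (1 - 2 * y1)) := one_mul _
  omega

lemma viLoop_spec (y1 y2 vy : Int) :
    ∀ (pos v s : Int) (acc : List Int),
      pos = pvPos vy s → v = vy - s → 0 ≤ s → (∀ x ∈ acc, x ≤ s) →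
      viLoop y1 y2 pos v s acc =
        acc ++ (PySem.List.pyRange (s + 1) (2 * max vy 0 + max 1 (1 - 2 * y1) + 2) 1).filter
          (fun t => decide (y1 ≤ pvPos vy t) && decide (pvPos vy t ≤ y2)) := by
  intro pos v s acc
  induction pos, v, s, acc using viLoop.induct y1 y2 with
  | case1 pos v s acc hrun ih =>
      intro h1 h2 h3 h4
      have hstep : pos + v = pvPos vy (s + 1) := by
        rw [pvPos_succ]; omega
      have hlt : s + 1 < 2 * max vy 0 + max 1 (1 - 2 * y1) + 2 := by
        rcases hrun with hr | hr
        · by_contra hcon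
          have := pvPos_bound y1 vy s (by omega)
          omega
        · omega
      have hnm : s + 1 ∉ acc := fun hmem => by have := h4 _ hmem; omega
      have hacc' : ∀ x ∈ (if y1 ≤ pos + v ∧ pos + v ≤ y2 then PySem.Set.add acc (s + 1) else acc),
          x ≤ s + 1 := by
        intro x hx
        split_ifs at hx with hc
        · rcases (PySem.Set.mem_add acc (s + 1) x).mp hx with hx' | hx'
          · have := h4 _ hx'; omega
          · omega
        · have := h4 _ hx; omega
      have IH := ih hstep (by omega) (by omega) (by simpa using hacc')
      simp only [dite_eq_ite] at IH
      rw [viLoop, if_pos hrun, IH,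
        PySem.List.pyRange_one_cons hlt, List.filter_cons]
      by_cases hc : y1 ≤ pos + v ∧ pos + v ≤ y2
      · rw [if_pos hc, PySem.Set.add_of_not_mem hnm]
        have : (decide (y1 ≤ pvPos vy (s + 1)) && decide (pvPos vy (s + 1) ≤ y2)) = true := by
          rw [← hstep]; simp [hc.1, hc.2]
        rw [this]
        simp
      · rw [if_neg hc]
        have : (decide (y1 ≤ pvPos vy (s + 1)) && decide (pvPos vy (s + 1) ≤ y2)) = false := by
          rw [← hstep]
          rcases not_and_or.mp hc with hc' | hc' <;> simp [hc']
        rw [this]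
        simp
  | case2 pos v s acc hstop =>
      intro h1 h2 h3 h4
      have hp : ¬ y1 ≤ pos := fun hh => hstop (Or.inl hh)
      have hv : ¬ 0 < v := fun hh => hstop (Or.inr hh)
      have hfil : (PySem.List.pyRange (s + 1) (2 * max vy 0 + max 1 (1 - 2 * y1) + 2) 1).filter
          (fun t => decide (y1 ≤ pvPos vy t) && decide (pvPos vy t ≤ y2)) = [] := by
        rw [List.filter_eq_nil_iff]
        intro t ht
        have hmem := (PySem.List.mem_pyRange_one).mp ht
        have hmono : pvPos vy t ≤ pvPos vy s := pvPos_mono vy s t (by omega) (by omega)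
        have : ¬ (y1 ≤ pvPos vy t) := by omega
        simp [this]
      rw [viLoop, if_neg hstop, hfil]
      simp

lemma vi_eq (y1 y2 vy : Int) :
    vertical_intersections vy y1 y2 =
      PySem.Set.ofList ((PySem.List.pyRange 1 (2 * max vy 0 + max 1 (1 - 2 * y1) + 2) 1).filter
        (fun s => decide (y1 ≤ pvPos vy s) && decide (pvPos vy s ≤ y2))) := by
  have h := viLoop_spec y1 y2 vy 0 vy 0 [] (pvPos_zero vy).symm (by omega) le_rfl (by simp)
  rw [PySem.Set.ofList_eq_self_of_nodup _ (List.Nodup.filter _ (PySem.List.nodup_pyRange_one _ _))]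
  simpa [vertical_intersections, PySem.Set.empty] using h

-- ===== VERDICT (by name: the statement is the Claim_ definition above) =====
theorem vertical_trajectories_spec : Claim_equal_vertical_trajectories := by
  intro target _ _
  unfold Spec_vertical_trajectories vertical_trajectories vertical_trajectories_alt
  simp only [vi_eq]
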